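-- pv_equiv track=rewrite | github.com/emksulliv/dataPrivacy | accounts/views.py | contactsParse
-- ===== SOURCE A (Python) =====
-- def contactsParse(contacts):
--     contactsList = []
--     for person in contacts:
--         #Everything here is self explanatory, I am, for example, taking the name field from the dictionary
--         #I see whether or not the get function returned a value, if so using the correct field, I put that in a
--         #Temporary variable which I then append to the dictionary at its respective key.
--         fella = {"Name":[],"Nickname":[],"Relation":[],"Email":[],"Phone":[],"Birthday":[], "Address":[], "Organization":[]}
--         names = person.get('names', [])
--         nicknames = person.get('nicknames', [])
--         relations = person.get('relations', [])
--         emails = person.get('emailAddresses', [])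
--         phones = person.get('phoneNumbers', [])
--         birthdays = person.get('birthdays', [])
--         addresses = person.get('addresses', [])
--         organizations = person.get('organizations', [])
--
--         #Welcome to if-statement hell
--         #There is probably a better, pythonic way of doing this but I don't care.
--         if names:
--             name = names[0].get('displayName')
--             fella["Name"].append(name)
--         else:
--             fella["Name"].append("Not Provided")
--
--         if nicknames:
--             nickname = nicknames[0].get('value')
--             fella["Nickname"].append(nickname)
--         else:
--             fella["Nickname"].append("Not Provided")
--
--         if relations:
--             type = relations[0].get('formattedType')
--             guy = relations[0].get('person')
--             fella["Relation"].append(guy + ", " + type)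
--         else:
--             fella["Relation"].append("Not Provided")
--
--         if emails:
--             email = emails[0].get('value')
--             fella["Email"].append(email)
--         else:
--             fella["Email"].append("Not Provided")
--
--         if phones:
--             phone = phones[0].get('canonicalForm')
--             fella["Phone"].append(phone)
--         else:
--             fella["Phone"].append("Not Provided")
--
--         if birthdays:
--             birthday = birthdays[0].get('text')
--             fella["Birthday"].append(birthday)
--         else:
--             fella["Birthday"].append("Not Provided")
--
--         if addresses:
--             address = addresses[0].get('formattedValue')
--             fella["Address"].append(address)
--         else:
--             fella["Address"].append("Not Provided")
--
--         if organizations: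
--             orgName = organizations[0].get('name')
--             title = organizations[0].get('title')
--             fella["Organization"].append(title + ", " + orgName)
--         else:
--             fella["Organization"].append("Not Provided")
--
--         contactsList.append(fella)
--
--     return contactsList
-- ===== SOURCE B (Python) =====
-- # Column-wise rewrite: instead of building each contact's dict in one row-wise pass,
-- # build one column (a list over ALL contacts) per output field, then transpose the
-- # columns into the per-person dicts.
--
-- def contactsParse(contacts):
--     def column(src, render):
--         col = []
--         for person in contacts:
--             entries = person.get(src, [])
--             col.append(render(entries[0]) if entries else "Not Provided")
--         return col
--
--     cols = [
--         ("Name", column('names', lambda e: e.get('displayName'))),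
--         ("Nickname", column('nicknames', lambda e: e.get('value'))),
--         ("Relation", column('relations', lambda e: e.get('person') + ", " + e.get('formattedType'))),
--         ("Email", column('emailAddresses', lambda e: e.get('value'))),
--         ("Phone", column('phoneNumbers', lambda e: e.get('canonicalForm'))),
--         ("Birthday", column('birthdays', lambda e: e.get('text'))),
--         ("Address", column('addresses', lambda e: e.get('formattedValue'))),
--         ("Organization", column('organizations', lambda e: e.get('title') + ", " + e.get('name'))),
--     ]
--     return [{key: [vals[i]] for key, vals in cols} for i in range(len(contacts))]
-- ===== Notes on version B (the rewrite author's own statement) =====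
-- stated objective: alternative
-- what changed: Replaces A's row-wise pass (build each contact's dict with eight if/else blocks) by a column-wise construction: one column list per output field across all contacts, then a transpose that assembles the per-person dicts by index.
-- outside the precondition, e.g. on contactsParse([{'relations': [{'person': 'Bob'}]}]): A raises TypeError, B raises TypeError
import Mathlib
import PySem

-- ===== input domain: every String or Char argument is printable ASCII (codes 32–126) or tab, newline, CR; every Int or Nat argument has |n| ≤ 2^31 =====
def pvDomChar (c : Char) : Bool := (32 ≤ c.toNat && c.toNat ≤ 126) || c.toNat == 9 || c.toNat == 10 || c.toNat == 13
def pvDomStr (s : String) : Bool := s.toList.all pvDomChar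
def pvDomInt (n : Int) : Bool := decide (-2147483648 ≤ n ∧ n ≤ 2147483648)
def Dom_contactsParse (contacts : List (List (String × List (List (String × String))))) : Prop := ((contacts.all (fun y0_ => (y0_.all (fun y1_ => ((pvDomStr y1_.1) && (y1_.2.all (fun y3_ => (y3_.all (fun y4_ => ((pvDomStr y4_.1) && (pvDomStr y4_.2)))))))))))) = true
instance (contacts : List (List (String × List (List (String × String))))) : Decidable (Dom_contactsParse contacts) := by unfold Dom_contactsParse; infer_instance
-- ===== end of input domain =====

-- B builds the result column-wise (one list per output field, then a transpose) instead of A's row-wise pass; objective: alternative.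
-- ===== PORT A =====
-- inner-dict .get(field): under Pre_ the lookup always succeeds, so the "" default is never used
def pvGetA (e : List (String × String)) (k : String) : String := (List.lookup k e).getD ""

-- the body of A's for-loop: builds fella (insertion order Name..Organization, each key appended one value)
def pvRowA (person : List (String × List (List (String × String)))) : List (String × List String) :=
  let names := (List.lookup "names" person).getD []
  let nicknames := (List.lookup "nicknames" person).getD []
  let relations := (List.lookup "relations" person).getD []
  let emails := (List.lookup "emailAddresses" person).getD []
  let phones := (List.lookup "phoneNumbers" person).getD []
  let birthdays := (List.lookup "birthdays" person).getD []
  let addresses := (List.lookup "addresses" person).getD []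
  let organizations := (List.lookup "organizations" person).getD []
  [ ("Name", [match names with | [] => "Not Provided" | e :: _ => pvGetA e "displayName"]),
    ("Nickname", [match nicknames with | [] => "Not Provided" | e :: _ => pvGetA e "value"]),
    ("Relation", [match relations with | [] => "Not Provided" | e :: _ => pvGetA e "person" ++ ", " ++ pvGetA e "formattedType"]),
    ("Email", [match emails with | [] => "Not Provided" | e :: _ => pvGetA e "value"]),
    ("Phone", [match phones with | [] => "Not Provided" | e :: _ => pvGetA e "canonicalForm"]),
    ("Birthday", [match birthdays with | [] => "Not Provided" | e :: _ => pvGetA e "text"]),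
    ("Address", [match addresses with | [] => "Not Provided" | e :: _ => pvGetA e "formattedValue"]),
    ("Organization", [match organizations with | [] => "Not Provided" | e :: _ => pvGetA e "title" ++ ", " ++ pvGetA e "name"]) ]

def contactsParse (contacts : List (List (String × List (List (String × String))))) : List (List (String × List String)) :=
  contacts.foldl (fun acc person => acc ++ [pvRowA person]) []

-- ===== PORT B =====
-- Source B's column(src, render): one value per contact for a single output field
def pvColumn (contacts : List (List (String × List (List (String × String))))) (src : String)
    (render : List (String × String) → String) : List String :=
  contacts.map (fun person =>
    match (List.lookup src person).getD [] with
    | [] => "Not Provided"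
    | e :: _ => render e)

def contactsParse_alt (contacts : List (List (String × List (List (String × String))))) : List (List (String × List String)) :=
  let cols : List (String × List String) :=
    [ ("Name", pvColumn contacts "names" (fun e => (List.lookup "displayName" e).getD "")),
      ("Nickname", pvColumn contacts "nicknames" (fun e => (List.lookup "value" e).getD "")),
      ("Relation", pvColumn contacts "relations" (fun e => (List.lookup "person" e).getD "" ++ ", " ++ (List.lookup "formattedType" e).getD "")),
      ("Email", pvColumn contacts "emailAddresses" (fun e => (List.lookup "value" e).getD "")),
      ("Phone", pvColumn contacts "phoneNumbers" (fun e => (List.lookup "canonicalForm" e).getD "")),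
      ("Birthday", pvColumn contacts "birthdays" (fun e => (List.lookup "text" e).getD "")),
      ("Address", pvColumn contacts "addresses" (fun e => (List.lookup "formattedValue" e).getD "")),
      ("Organization", pvColumn contacts "organizations" (fun e => (List.lookup "title" e).getD "" ++ ", " ++ (List.lookup "name" e).getD "")) ]
  -- vals[i]: i ranges over 0..len-1, so the index is in range; getD "" is exact here
  (List.range contacts.length).map (fun i => cols.map (fun kv => (kv.1, [kv.2.getD i ""])))

-- ===== PRECONDITION & SPEC =====
-- Pre_ excludes inputs where some present, nonempty source list has a first entry missing a required field:
-- there Python A either appends None (not a str) or raises TypeError on the "+ ', ' +" concatenation.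
def pvFieldOk (person : List (String × List (List (String × String)))) (src : String) (fields : List String) : Bool :=
  match (List.lookup src person).getD [] with
  | [] => true
  | e :: _ => fields.all (fun f => (List.lookup f e).isSome)

def Pre_contactsParse (contacts : List (List (String × List (List (String × String))))) : Prop :=
  (contacts.all (fun person =>
    pvFieldOk person "names" ["displayName"] &&
    pvFieldOk person "nicknames" ["value"] &&
    pvFieldOk person "relations" ["person", "formattedType"] &&
    pvFieldOk person "emailAddresses" ["value"] &&
    pvFieldOk person "phoneNumbers" ["canonicalForm"] &&
    pvFieldOk person "birthdays" ["text"] &&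
    pvFieldOk person "addresses" ["formattedValue"] &&
    pvFieldOk person "organizations" ["title", "name"])) = true

instance (contacts : List (List (String × List (List (String × String))))) : Decidable (Pre_contactsParse contacts) := by unfold Pre_contactsParse; infer_instance

def pvWitness_contactsParse : (List (List (String × List (List (String × String))))) :=
  [[("names", [[("displayName", "Alice")]]), ("relations", [[("person", "Bob"), ("formattedType", "friend")]])], []]

def Spec_contactsParse (contacts : List (List (String × List (List (String × String))))) (out : List (List (String × List String))) : Prop := out = contactsParse_alt contacts
instance (contacts : List (List (String × List (List (String × String))))) (out : List (List (String × List String))) : Decidable (Spec_contactsParse contacts out) := by unfold Spec_contactsParse; infer_instance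

-- ===== CLAIM (what is proved, stated in full; the proofs are below) =====
def Claim_equal_contactsParse : Prop := ∀ (contacts : List (List (String × List (List (String × String))))), Dom_contactsParse contacts → Pre_contactsParse contacts → Spec_contactsParse contacts (contactsParse contacts)

-- ===== LEMMAS AND PROOFS =====
-- transposing B's columns at index i yields exactly A's row for the i-th person
theorem contactsParse_alt_eq_map (contacts : List (List (String × List (List (String × String))))) :
    contactsParse_alt contacts = contacts.map pvRowA := by
  unfold contactsParse_alt
  apply List.ext_getElem
  · simp
  · intro i h1 h2
    simp only [List.getElem_map, List.getElem_range] at *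
    simp [pvColumn, List.getD_eq_getElem?_getD, List.getElem?_map,
          List.getElem?_eq_getElem (by simpa using h2), pvRowA, pvGetA]

-- ===== VERDICT (by name: the statement is the Claim_ definition above) =====
theorem contactsParse_spec : Claim_equal_contactsParse := by
  intro contacts _ _
  unfold Spec_contactsParse contactsParse
  rw [PySem.List.foldl_append_singleton_eq_map, contactsParse_alt_eq_map]
  simp
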